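-- pv_equiv track=rewrite | github.com/daniel-reich/turbo-robot | YrNKDhmWPsm735J8L_21.py | sort_word
-- ===== SOURCE A (Python) =====
-- def sort_word(word):
--     result1 = []
--     result2 = []
--     result3 = ''
--     for i in word:
--         if i.isupper():
--             result1 += i
--         elif i.islower():
--             result2 += i
--         else:
--             result3 += i
--     result1.sort()
--     result2.sort()
--     result1.extend(result2)
--     for i in result1:
--         result3 += i
--     return result3
-- ===== SOURCE B (Python) =====
-- def sort_word(word):
--     # counting sort over the fixed 52-letter alphabet: one pass to count, one fixed sweep to emit
--     others = []
--     counts = {}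
--     for c in word:
--         if c.isalpha():
--             counts[c] = counts.get(c, 0) + 1
--         else:
--             others.append(c)
--     letters = [chr(k) for k in range(65, 91)] + [chr(k) for k in range(97, 123)]
--     return ''.join(others) + ''.join(c * counts.get(c, 0) for c in letters)
-- ===== Notes on version B (the rewrite author's own statement) =====
-- stated objective: faster
-- what changed: Replaces the two comparison sorts of the letter lists by a single counting pass into a per-letter counter plus one fixed sweep over the 52-letter alphabet (counting sort).
import Mathlib
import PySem

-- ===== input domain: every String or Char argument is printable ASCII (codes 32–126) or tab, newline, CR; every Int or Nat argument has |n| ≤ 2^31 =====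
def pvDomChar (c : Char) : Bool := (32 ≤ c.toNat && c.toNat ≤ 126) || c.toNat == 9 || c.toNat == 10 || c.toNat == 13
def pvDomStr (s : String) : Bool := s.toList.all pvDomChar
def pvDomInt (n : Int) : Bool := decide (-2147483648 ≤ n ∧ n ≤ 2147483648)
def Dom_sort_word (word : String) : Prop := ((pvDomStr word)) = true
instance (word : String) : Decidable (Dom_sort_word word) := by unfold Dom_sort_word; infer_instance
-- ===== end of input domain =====

-- B replaces A's two comparison sorts by one counting pass plus a fixed 52-letter sweep (counting sort).

-- ===== PORT A =====
def sort_word (word : String) : String :=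
  -- result1/result2 letter lists, result3 the non-letter string (kept as List Char)
  let st := word.toList.foldl
    (fun (st : List Char × List Char × List Char) i =>
      if PySem.Chars.isupper i then (st.1 ++ [i], st.2.1, st.2.2)
      else if PySem.Chars.islower i then (st.1, st.2.1 ++ [i], st.2.2)
      else (st.1, st.2.1, st.2.2 ++ [i])) ([], [], [])
  let r1 := PySem.List.sorted st.1 (fun x => x)
  let r2 := PySem.List.sorted st.2.1 (fun x => x)
  let r12 := r1 ++ r2
  String.mk (r12.foldl (fun acc i => acc ++ [i]) st.2.2)

-- ===== PORT B =====
def sort_word_alt (word : String) : String :=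
  let st := word.toList.foldl
    (fun (st : List Char × PySem.Dict Char Int) c =>
      if PySem.Chars.isalpha c then (st.1, st.2.modify c 0 (· + 1))
      else (st.1 ++ [c], st.2)) ([], PySem.Dict.empty)
  let letters := (PySem.List.pyRange 65 91 1).map (fun k => Char.ofNat k.toNat)
              ++ (PySem.List.pyRange 97 123 1).map (fun k => Char.ofNat k.toNat)
  String.mk (st.1 ++ letters.flatMap (fun c => List.replicate (st.2.getD c 0).toNat c))

-- ===== PRECONDITION & SPEC =====
def Spec_sort_word (word : String) (out : String) : Prop := out = sort_word_alt word
instance (word : String) (out : String) : Decidable (Spec_sort_word word out) := by unfold Spec_sort_word; infer_instance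

-- ===== CLAIM (what is proved, stated in full; the proofs are below) =====
def Claim_equal_sort_word : Prop := ∀ (word : String), Dom_sort_word word → Spec_sort_word word (sort_word word)

-- ===== LEMMAS AND PROOFS =====

theorem foldA_eq (l r1 r2 r3 : List Char) :
    l.foldl (fun (st : List Char × List Char × List Char) i =>
      if PySem.Chars.isupper i then (st.1 ++ [i], st.2.1, st.2.2)
      else if PySem.Chars.islower i then (st.1, st.2.1 ++ [i], st.2.2)
      else (st.1, st.2.1, st.2.2 ++ [i])) (r1, r2, r3) =
    (r1 ++ l.filter PySem.Chars.isupper,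
     r2 ++ l.filter (fun c => !PySem.Chars.isupper c && PySem.Chars.islower c),
     r3 ++ l.filter (fun c => !PySem.Chars.isupper c && !PySem.Chars.islower c)) := by
  induction l generalizing r1 r2 r3 with
  | nil => simp
  | cons a t ih =>
    by_cases hu : PySem.Chars.isupper a
    · simp [List.foldl_cons, hu, ih]
    · by_cases hl : PySem.Chars.islower a
      · simp [List.foldl_cons, hu, hl, ih]
      · simp [List.foldl_cons, hu, hl, ih]

theorem foldB_eq (l os : List Char) (d : PySem.Dict Char Int) :
    l.foldl (fun (st : List Char × PySem.Dict Char Int) c =>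
      if PySem.Chars.isalpha c then (st.1, st.2.modify c 0 (· + 1))
      else (st.1 ++ [c], st.2)) (os, d) =
    (os ++ l.filter (fun c => !PySem.Chars.isalpha c),
     (l.filter PySem.Chars.isalpha).foldl (fun d x => d.modify x 0 (· + 1)) d) := by
  induction l generalizing os d with
  | nil => simp
  | cons a t ih =>
    by_cases ha : PySem.Chars.isalpha a
    · simp [List.foldl_cons, ha, ih]
    · simp [List.foldl_cons, ha, ih]

theorem foldl_append_chars (l acc : List Char) :
    l.foldl (fun acc i => acc ++ [i]) acc = acc ++ l := by
  induction l generalizing acc with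
  | nil => simp
  | cons a t ih => simp [List.foldl_cons, ih]

theorem count_flatMap_replicate (cs : List Char) (n : Char → Nat) (hnd : cs.Nodup) (a : Char) :
    (cs.flatMap (fun c => List.replicate (n c) c)).count a = if a ∈ cs then n a else 0 := by
  induction cs with
  | nil => simp
  | cons c t ih =>
    simp only [List.flatMap_cons, List.count_append, List.count_replicate,
      List.mem_cons, ih hnd.of_cons]
    rcases List.nodup_cons.mp hnd with ⟨hc, _⟩
    by_cases hac : a = c
    · subst hac; simp [hc]
    · simp [hac, Ne.symm hac]

theorem pairwise_flatMap_replicate (cs : List Char) (n : Char → Nat)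
    (h : cs.Pairwise (· ≤ ·)) :
    (cs.flatMap (fun c => List.replicate (n c) c)).Pairwise (· ≤ ·) := by
  induction cs with
  | nil => simp
  | cons c t ih =>
    simp only [List.flatMap_cons]
    rw [List.pairwise_append]
    refine ⟨List.pairwise_replicate.mpr (Or.inr le_rfl), ih h.of_cons, ?_⟩
    intro x hx y hy
    rcases List.eq_of_mem_replicate hx with rfl
    rcases List.mem_flatMap.mp hy with ⟨c', hc', hy'⟩
    rcases List.eq_of_mem_replicate hy' with rfl
    exact (List.pairwise_cons.mp h).1 _ hc'

-- counting-sort characterisation: sorted(filter p l) is the alphabet sweep of replicates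
theorem sorted_filter_eq_flatMap (l cs : List Char) (p : Char → Bool)
    (hnd : cs.Nodup) (hsort : cs.Pairwise (· ≤ ·))
    (hmem : ∀ a, a ∈ cs ↔ p a = true) :
    PySem.List.sorted (l.filter p) (fun x => x) =
    cs.flatMap (fun c => List.replicate (l.count c) c) := by
  apply PySem.List.sorted_id_eq_of_perm_of_pairwise
  · rw [List.perm_iff_count]
    intro a
    rw [count_flatMap_replicate cs _ hnd a]
    by_cases hp : p a = true
    · simp [(hmem a).mpr hp, List.count_filter, hp]
    · have hnm : a ∉ l.filter p := fun h => hp (List.of_mem_filter h)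
      rw [if_neg (fun h => hp ((hmem a).mp h)), List.count_eq_zero.mpr hnm]
  · exact pairwise_flatMap_replicate cs _ hsort

def uppersL : List Char := (PySem.List.pyRange 65 91 1).map (fun k => Char.ofNat k.toNat)
def lowersL : List Char := (PySem.List.pyRange 97 123 1).map (fun k => Char.ofNat k.toNat)

theorem uppersL_lit : uppersL = ['A','B','C','D','E','F','G','H','I','J','K','L','M','N','O','P','Q','R','S','T','U','V','W','X','Y','Z'] := by decide
theorem lowersL_lit : lowersL = ['a','b','c','d','e','f','g','h','i','j','k','l','m','n','o','p','q','r','s','t','u','v','w','x','y','z'] := by decide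

theorem mem_uppersL (a : Char) : a ∈ uppersL ↔ PySem.Chars.isupper a = true := by
  rw [uppersL_lit]
  constructor
  · intro h; fin_cases h <;> decide
  · intro h
    have hb : 65 ≤ a.toNat ∧ a.toNat ≤ 90 := by
      simp only [PySem.Chars.isupper, Bool.and_eq_true, decide_eq_true_eq, Char.le_def] at h
      exact ⟨h.1, h.2⟩
    have ha : a = Char.ofNat a.toNat := (Char.ofNat_toNat a).symm
    obtain ⟨h1, h2⟩ := hb
    interval_cases h : a.toNat <;> rw [ha] <;> decide

theorem mem_lowersL (a : Char) : a ∈ lowersL ↔ PySem.Chars.islower a = true := by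
  rw [lowersL_lit]
  constructor
  · intro h; fin_cases h <;> decide
  · intro h
    have hb : 97 ≤ a.toNat ∧ a.toNat ≤ 122 := by
      simp only [PySem.Chars.islower, Bool.and_eq_true, decide_eq_true_eq, Char.le_def] at h
      exact ⟨h.1, h.2⟩
    have ha : a = Char.ofNat a.toNat := (Char.ofNat_toNat a).symm
    obtain ⟨h1, h2⟩ := hb
    interval_cases h : a.toNat <;> rw [ha] <;> decide

theorem uppersL_nodup : uppersL.Nodup := by rw [uppersL_lit]; decide
theorem lowersL_nodup : lowersL.Nodup := by rw [lowersL_lit]; decide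
theorem uppersL_sorted : uppersL.Pairwise (· ≤ ·) := by rw [uppersL_lit]; decide
theorem lowersL_sorted : lowersL.Pairwise (· ≤ ·) := by rw [lowersL_lit]; decide

theorem not_upper_of_lower (a : Char) (h : PySem.Chars.islower a = true) :
    PySem.Chars.isupper a = false := by
  by_contra hc
  rw [Bool.not_eq_false] at hc
  simp only [PySem.Chars.islower, PySem.Chars.isupper, Bool.and_eq_true, decide_eq_true_eq,
    Char.le_def, UInt32.le_iff_toNat_le] at h hc
  have e1 : 'a'.val.toNat = 97 := rfl
  have e2 : 'z'.val.toNat = 122 := rfl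
  have e3 : 'A'.val.toNat = 65 := rfl
  have e4 : 'Z'.val.toNat = 90 := rfl
  omega

-- ===== VERDICT (by name: the statement is the Claim_ definition above) =====
theorem sort_word_spec : Claim_equal_sort_word := by
  intro word _
  unfold Spec_sort_word sort_word sort_word_alt
  simp only [foldA_eq, foldB_eq, List.nil_append, foldl_append_chars]
  rw [show ((PySem.List.pyRange 65 91 1).map (fun k => Char.ofNat k.toNat)) = uppersL from rfl,
      show ((PySem.List.pyRange 97 123 1).map (fun k => Char.ofNat k.toNat)) = lowersL from rfl]
  set l := word.toList with hl
  -- counts: getD of the modify-fold is the filtered count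
  have hcnt : ∀ c : Char,
      ((l.filter PySem.Chars.isalpha).foldl (fun d x => d.modify x 0 (· + 1))
        PySem.Dict.empty).getD c 0 = ((l.filter PySem.Chars.isalpha).count c : Int) := by
    intro c
    rw [PySem.Dict.getD_foldl_modify_add_one]
    simp [PySem.Dict.empty, PySem.Dict.getD, PySem.Dict.get?]
  -- the non-letter prefixes coincide
  have hpre : l.filter (fun c => !PySem.Chars.isupper c && !PySem.Chars.islower c)
            = l.filter (fun c => !PySem.Chars.isalpha c) := by
    apply List.filter_congr
    intro x _
    simp [PySem.Chars.isalpha]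
  rw [hpre]
  apply congrArg
  apply congrArg (l.filter (fun c => !PySem.Chars.isalpha c) ++ ·)
  rw [List.flatMap_append]
  have hfl : l.filter (fun c => !PySem.Chars.isupper c && PySem.Chars.islower c)
           = l.filter PySem.Chars.islower := by
    apply List.filter_congr
    intro x _
    by_cases hx : PySem.Chars.islower x
    · simp [hx, not_upper_of_lower x hx]
    · simp [hx]
  rw [hfl]
  rw [sorted_filter_eq_flatMap l uppersL PySem.Chars.isupper uppersL_nodup uppersL_sorted mem_uppersL,
      sorted_filter_eq_flatMap l lowersL PySem.Chars.islower lowersL_nodup lowersL_sorted mem_lowersL]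
  have hcancel : ∀ (cs : List Char) (p : Char → Bool), (∀ a ∈ cs, p a = true) →
      (∀ a, p a = true → PySem.Chars.isalpha a = true) →
      cs.flatMap (fun c => List.replicate (l.count c) c) =
      cs.flatMap (fun c => List.replicate
        (((l.filter PySem.Chars.isalpha).foldl
            (fun (d : PySem.Dict Char Int) x => d.modify x 0 (· + 1))
          PySem.Dict.empty).getD c 0).toNat c) := by
    intro cs p hp halpha
    apply List.flatMap_congr
    intro c hc
    rw [hcnt c]
    rw [List.count_filter (halpha c (hp c hc))]
    simp
  rw [hcancel uppersL PySem.Chars.isupper (fun a h => (mem_uppersL a).mp h) ?hu,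
      hcancel lowersL PySem.Chars.islower (fun a h => (mem_lowersL a).mp h) ?hl]
  case hu => intro a h; simp [PySem.Chars.isalpha, h]
  case hl => intro a h; simp [PySem.Chars.isalpha, h]
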